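-- pv_equiv track=rewrite | github.com/marcoaccolla/google-foobar | level-2/ion-flux-relabeling/solution.py | find_flux
-- ===== SOURCE A (Python) =====
-- import math
--
-- def find_flux(tree, index):
--     # now find the flux above the one requested
--     # search in every level
--     result = 0
--     for i, level in enumerate(tree):
--         # get the index
--         pos = level.index(index) if index in level else -1
--         # if we found the flux in the root-level we return -1
--         if pos == -1:
--             continue
--
--         if i == 0:
--             result = -1
--         # else we get the index of the level above by dividing down the position of the flux by 2
--         else:
--             result = tree[i - 1][int(math.floor(pos / 2))]
--
--     return result
-- ===== SOURCE B (Python) =====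
-- def find_flux(tree, index):
--     # Scan levels from the bottom up: the last level containing `index` decides
--     # the result, so the first hit from the end lets us return immediately.
--     for i in range(len(tree) - 1, -1, -1):
--         level = tree[i]
--         if index in level:
--             if i == 0:
--                 return -1
--             return tree[i - 1][level.index(index) // 2]
--     return 0
-- ===== Notes on version B (the rewrite author's own statement) =====
-- stated objective: alternative
-- what changed: B scans the levels bottom-up and returns at the first (deepest) level containing the value, instead of A's full forward pass over every level that keeps overwriting the result.
import Mathlib
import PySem

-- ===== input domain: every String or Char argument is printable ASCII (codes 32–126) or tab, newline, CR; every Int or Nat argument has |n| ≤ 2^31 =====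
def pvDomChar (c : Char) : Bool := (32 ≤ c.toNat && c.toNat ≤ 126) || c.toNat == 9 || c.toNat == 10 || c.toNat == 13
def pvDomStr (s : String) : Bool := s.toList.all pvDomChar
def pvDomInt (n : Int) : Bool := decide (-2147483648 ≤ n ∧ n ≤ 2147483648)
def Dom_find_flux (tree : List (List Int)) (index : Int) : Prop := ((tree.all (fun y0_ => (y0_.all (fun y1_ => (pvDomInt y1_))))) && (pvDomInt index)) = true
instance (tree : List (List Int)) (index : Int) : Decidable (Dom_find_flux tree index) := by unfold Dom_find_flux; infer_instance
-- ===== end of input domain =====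

-- B scans the levels bottom-up and returns at the first (= deepest) level containing
-- `index`, instead of A's full forward pass that keeps overwriting the result (alternative
-- decomposition; return value proved equal on Pre_).


-- ===== PORT A =====
-- literal transliteration: fold over enumerate(tree) with the `result` accumulator;
-- `int(math.floor(pos / 2))` is ported as floor division by 2 (exact on these Nat positions);
-- `tree[i-1][...]` uses pyGet? with default [] / 0 — Pre_ excludes the raising inputs.
def find_flux (tree : List (List Int)) (index : Int) : Int :=
  (PySem.List.enumerate tree 0).foldl
    (fun result iv =>
      let i := iv.1
      let level := iv.2
      let pos : Int := if index ∈ level then ((PySem.List.index? level index).getD 0 : Nat) else -1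
      if pos = -1 then result
      else if i = 0 then -1
      else ((PySem.List.pyGet? ((PySem.List.pyGet? tree (i - 1)).getD [])
              (PySem.Int.floordiv pos 2)).getD 0))
    0

-- ===== PORT B =====
-- literal transliteration of Source B: the counter runs i = n-1, …, 0 (argument n+1 ↦ level n);
-- first level from the end containing `index` returns immediately, otherwise keep descending.
def findFluxFromTop (tree : List (List Int)) (index : Int) : Nat → Int
  | 0 => 0
  | n + 1 =>
    let level := tree.getD n []
    if index ∈ level then
      if n = 0 then -1
      else ((tree.getD (n - 1) [])[((PySem.List.index? level index).getD 0) / 2]?).getD 0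
    else findFluxFromTop tree index n

def find_flux_alt (tree : List (List Int)) (index : Int) : Int :=
  findFluxFromTop tree index tree.length

-- ===== PRECONDITION & SPEC =====
-- Pre_ excludes exactly the inputs where Python A raises IndexError: a non-root level
-- containing `index` whose first position, halved, is out of range in the level above.
def Pre_find_flux (tree : List (List Int)) (index : Int) : Prop :=
  ∀ i : Nat, i < tree.length → 0 < i → index ∈ tree.getD i [] →
    ((PySem.List.index? (tree.getD i []) index).getD 0) / 2 < (tree.getD (i - 1) []).length
instance (tree : List (List Int)) (index : Int) : Decidable (Pre_find_flux tree index) := by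
  unfold Pre_find_flux; infer_instance

def pvWitness_find_flux : List (List Int) × Int := ([[7], [2, 3]], 3)

def Spec_find_flux (tree : List (List Int)) (index : Int) (out : Int) : Prop := out = find_flux_alt tree index
instance (tree : List (List Int)) (index : Int) (out : Int) : Decidable (Spec_find_flux tree index out) := by unfold Spec_find_flux; infer_instance

-- ===== CLAIM (what is proved, stated in full; the proofs are below) =====
def Claim_equal_find_flux : Prop := ∀ (tree : List (List Int)) (index : Int), Dom_find_flux tree index → Pre_find_flux tree index → Spec_find_flux tree index (find_flux tree index)

-- ===== LEMMAS AND PROOFS =====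

-- A's loop body, after rewriting enumerate as a map over pyRange.
def fluxBodyA (tree : List (List Int)) (index : Int) (result : Int) (i : Int) (level : List Int) : Int :=
  let pos : Int := if index ∈ level then ((PySem.List.index? level index).getD 0 : Nat) else -1
  if pos = -1 then result
  else if i = 0 then -1
  else ((PySem.List.pyGet? ((PySem.List.pyGet? tree (i - 1)).getD [])
          (PySem.Int.floordiv pos 2)).getD 0)

-- the branch values of A and B coincide at level n ≥ 1 (both are in-range-or-default reads)
theorem fluxVal_eq (tree : List (List Int)) (index : Int) (n : Nat) (hn : 0 < n) :
    ((PySem.List.pyGet? ((PySem.List.pyGet? tree ((n : Int) - 1)).getD [])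
        (PySem.Int.floordiv (((PySem.List.index? (tree.getD n []) index).getD 0 : Nat) : Int) 2)).getD 0)
    = ((tree.getD (n - 1) [])[((PySem.List.index? (tree.getD n []) index).getD 0) / 2]?).getD 0 := by
  have h1 : ((n : Int) - 1) = ((n - 1 : Nat) : Int) := by omega
  have h2 : PySem.Int.floordiv (((PySem.List.index? (tree.getD n []) index).getD 0 : Nat) : Int) 2
      = ((((PySem.List.index? (tree.getD n []) index).getD 0) / 2 : Nat) : Int) := by
    rw [PySem.Int.floordiv_eq_ediv_of_pos (by norm_num : (0:Int) < 2)]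
    omega
  rw [h1, PySem.List.pyGet?_natCast, h2, PySem.List.pyGet?_natCast]
  simp [List.getD]

-- the fold over the first n indices equals the bottom-up scan from n
theorem foldA_eq_fromTop (tree : List (List Int)) (index : Int) (n : Nat) :
    (List.foldl (fun result j => fluxBodyA tree index result j (PySem.List.pyGetD tree j []))
      0 (PySem.List.pyRange 0 (n : Int) 1)) = findFluxFromTop tree index n := by
  induction n with
  | zero => simp [PySem.List.pyRange_one_eq_nil, findFluxFromTop]
  | succ n ih =>
    have hcast : ((n + 1 : Nat) : Int) = (n : Int) + 1 := by push_cast; ring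
    rw [hcast, PySem.List.pyRange_one_succ_right (by positivity), List.foldl_append]
    simp only [List.foldl]
    rw [ih]
    have hget : PySem.List.pyGetD tree (n : Int) [] = tree.getD n [] := by
      simp [PySem.List.pyGetD_natCast]
    by_cases hmem : index ∈ tree.getD n []
    · have hmem' : index ∈ tree[n]?.getD [] := by simpa [List.getD] using hmem
      simp only [fluxBodyA, hget, hmem, if_pos]
      have hpos : (((PySem.List.index? (tree.getD n []) index).getD 0 : Nat) : Int) ≠ -1 := by
        omega
      rw [if_neg hpos]
      by_cases hz : n = 0
      · subst hz
        simp [findFluxFromTop, List.getD, hmem']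
      · have hnz : ((n : Nat) : Int) ≠ 0 := by omega
        rw [if_neg hnz, fluxVal_eq tree index n (Nat.pos_of_ne_zero hz)]
        simp [findFluxFromTop, List.getD, hmem', hz]
    · have hmem' : index ∉ tree[n]?.getD [] := by simpa [List.getD] using hmem
      simp only [fluxBodyA, hget]
      rw [if_neg hmem, if_pos rfl]
      simp [findFluxFromTop, List.getD, hmem']

theorem find_flux_eq_alt (tree : List (List Int)) (index : Int) :
    find_flux tree index = find_flux_alt tree index := by
  unfold find_flux find_flux_alt
  rw [PySem.List.enumerate_eq_map_pyRange tree ([] : List Int), List.foldl_map]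
  exact foldA_eq_fromTop tree index tree.length

-- ===== VERDICT (by name: the statement is the Claim_ definition above) =====
theorem find_flux_spec : Claim_equal_find_flux := by
  intro tree index _ _
  unfold Spec_find_flux
  exact find_flux_eq_alt tree index
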